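-- pv_equiv track=rewrite | github.com/DFYRANKINGS/Law-Office-of-Angelo-J.-Reyes-APC-AI-Data | ai-generators/build_public_pages.py | _toc_block
-- ===== SOURCE A (Python) =====
-- def escape_html(text):
--     if not isinstance(text, str):
--         return ""
--     return text.replace("&", "&amp;").replace("<", "&lt;").replace(">", "&gt;")
--
-- def _toc_block(title_items):
--     """title_items: list of (anchor_id, display_title, category)"""
--     # group by category
--     cats = {}
--     for aid, disp, cat in title_items:
--         cats.setdefault(cat, []).append((aid, disp))
--     html = ['<div class="toc"><h2>Table of Contents</h2>']
--     for cat in sorted(cats.keys()):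
--         html.append(f'<h3 style="margin-bottom:0.25rem;">{escape_html(cat)}</h3>')
--         html.append("<ul>")
--         for aid, disp in cats[cat]:
--             html.append(f'<li><a href="#{escape_html(aid)}">{escape_html(disp)}</a></li>')
--         html.append("</ul>")
--     html.append("</div>")
--     return "".join(html)
-- ===== SOURCE B (Python) =====
-- def escape_html(text):
--     if not isinstance(text, str):
--         return ""
--     return text.replace("&", "&amp;").replace("<", "&lt;").replace(">", "&gt;")
--
-- def _toc_block(title_items):
--     """title_items: list of (anchor_id, display_title, category)"""
--     # no dict: sort the distinct categories once, then filter the items per category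
--     body = "".join(
--         f'<h3 style="margin-bottom:0.25rem;">{escape_html(cat)}</h3><ul>'
--         + "".join(f'<li><a href="#{escape_html(aid)}">{escape_html(disp)}</a></li>'
--                   for aid, disp, c in title_items if c == cat)
--         + "</ul>"
--         for cat in sorted({c for _, _, c in title_items})
--     )
--     return '<div class="toc"><h2>Table of Contents</h2>' + body + "</div>"
-- ===== Notes on version B (the rewrite author's own statement) =====
-- stated objective: idiomatic
-- what changed: B drops A's intermediate grouping dict entirely: it sorts the distinct categories once and emits each category's items by filtering the input list, building the page as one join of per-category f-strings.
import Mathlib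
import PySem

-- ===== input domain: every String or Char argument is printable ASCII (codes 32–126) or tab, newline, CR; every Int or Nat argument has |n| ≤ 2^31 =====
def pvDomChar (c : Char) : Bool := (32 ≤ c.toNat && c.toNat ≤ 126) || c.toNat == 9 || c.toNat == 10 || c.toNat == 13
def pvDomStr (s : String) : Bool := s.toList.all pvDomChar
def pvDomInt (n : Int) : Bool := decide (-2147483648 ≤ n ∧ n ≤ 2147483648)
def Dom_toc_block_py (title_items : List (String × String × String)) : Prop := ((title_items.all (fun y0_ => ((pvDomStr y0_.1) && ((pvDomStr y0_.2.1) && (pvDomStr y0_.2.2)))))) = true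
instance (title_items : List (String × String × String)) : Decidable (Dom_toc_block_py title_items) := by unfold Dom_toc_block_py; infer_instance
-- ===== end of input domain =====

-- B replaces A's grouping dict by one sorted pass over the distinct categories with a
-- per-category filter (idiomatic sort-then-emit decomposition); same return value everywhere.

-- shared helper (identical in Source A and Source B): escape_html on strings
def escHtml (s : String) : String :=
  PySem.Str.replace (PySem.Str.replace (PySem.Str.replace s "&" "&amp;") "<" "&lt;") ">" "&gt;"

-- ===== PORT A =====
def tocLi (aid disp : String) : String :=
  "<li><a href=\"#" ++ escHtml aid ++ "\">" ++ escHtml disp ++ "</a></li>"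

def tocH3 (cat : String) : String :=
  "<h3 style=\"margin-bottom:0.25rem;\">" ++ escHtml cat ++ "</h3>"

def toc_block_py (title_items : List (String × String × String)) : String :=
  -- cats.setdefault(cat, []).append((aid, disp))
  let cats : PySem.Dict String (List (String × String)) :=
    title_items.foldl (fun d t => d.modify t.2.2 [] (· ++ [(t.1, t.2.1)])) PySem.Dict.empty
  let html : List String := ["<div class=\"toc\"><h2>Table of Contents</h2>"]
  let html := (PySem.List.sorted cats.keys (fun x => x) false).foldl (fun html cat =>
      let html := html ++ [tocH3 cat]
      let html := html ++ ["<ul>"]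
      let html := (cats.getD cat []).foldl (fun html p => html ++ [tocLi p.1 p.2]) html
      html ++ ["</ul>"]) html
  let html := html ++ ["</div>"]
  PySem.Str.join "" html

-- ===== PORT B =====
def toc_block_py_alt (title_items : List (String × String × String)) : String :=
  let body := PySem.Str.join ""
    ((PySem.List.sorted (PySem.Set.ofList (title_items.map (fun t => t.2.2))) (fun x => x) false).map
      (fun cat =>
        tocH3 cat ++ "<ul>"
          ++ PySem.Str.join "" ((title_items.filter (fun t => t.2.2 == cat)).map (fun t => tocLi t.1 t.2.1))
          ++ "</ul>"))
  "<div class=\"toc\"><h2>Table of Contents</h2>" ++ body ++ "</div>"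

-- ===== PRECONDITION & SPEC =====
def Spec_toc_block_py (title_items : List (String × String × String)) (out : String) : Prop := out = toc_block_py_alt title_items
instance (title_items : List (String × String × String)) (out : String) : Decidable (Spec_toc_block_py title_items out) := by unfold Spec_toc_block_py; infer_instance

-- ===== CLAIM (what is proved, stated in full; the proofs are below) =====
def Claim_equal_toc_block_py : Prop := ∀ (title_items : List (String × String × String)), Dom_toc_block_py title_items → Spec_toc_block_py title_items (toc_block_py title_items)

-- ===== LEMMAS AND PROOFS =====

theorem intercalate_nil_eq_flatten (l : List (List Char)) : List.intercalate [] l = l.flatten := by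
  induction l with
  | nil => simp [List.intercalate]
  | cons a t ih =>
    cases t with
    | nil => simp [List.intercalate]
    | cons b u => simp only [List.intercalate, List.intersperse] at *; simp_all

-- A's html-building loop, flattened into one flatMap over the sorted categories
theorem tocA_foldl (cats : PySem.Dict String (List (String × String))) (acc : List String)
    (l : List String) :
    l.foldl (fun html cat =>
      ((cats.getD cat []).foldl (fun html p => html ++ [tocLi p.1 p.2])
        (html ++ [tocH3 cat] ++ ["<ul>"])) ++ ["</ul>"]) acc
    = acc ++ l.flatMap (fun cat =>
        [tocH3 cat, "<ul>"] ++ (cats.getD cat []).map (fun p => tocLi p.1 p.2) ++ ["</ul>"]) := by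
  induction l generalizing acc with
  | nil => simp
  | cons c t ih =>
    simp only [List.foldl_cons, List.flatMap_cons]
    rw [ih]
    simp only [PySem.List.foldl_append_singleton_eq_map]
    simp [List.append_assoc, List.flatMap_def]

-- the grouping dict: keys and per-category contents, in terms of the input list
theorem tocA_keys (ti : List (String × String × String)) :
    (ti.foldl (fun d t => d.modify t.2.2 [] (· ++ [(t.1, t.2.1)])) PySem.Dict.empty).keys
      = PySem.Set.ofList (ti.map (fun t => t.2.2)) := by
  rw [PySem.Dict.keys_foldl_modify_key]
  simp [PySem.Set.update_nil_left, PySem.Dict.empty]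

theorem tocA_getD (ti : List (String × String × String)) (c : String) :
    (ti.foldl (fun d t => d.modify t.2.2 [] (· ++ [(t.1, t.2.1)])) PySem.Dict.empty).getD c []
      = (ti.filter (fun t => t.2.2 == c)).map (fun t => (t.1, t.2.1)) := by
  have h := PySem.Dict.getD_foldl_modify_append
    (l := ti.map (fun t => (t.2.2, (t.1, t.2.1)))) (d := PySem.Dict.empty) (c := c)
  rw [List.foldl_map] at h
  simp only [h, List.filter_map, List.map_map]
  simp [Function.comp_def, PySem.Dict.empty, PySem.Dict.getD, PySem.Dict.get?]

-- ===== VERDICT (by name: the statement is the Claim_ definition above) =====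
theorem toc_block_py_spec : Claim_equal_toc_block_py := by
  intro ti _
  unfold Spec_toc_block_py
  simp only [toc_block_py, toc_block_py_alt]
  rw [tocA_foldl, tocA_keys]
  simp only [tocA_getD]
  apply String.toList_inj.mp
  simp [PySem.Chars.join, intercalate_nil_eq_flatten, String.toList_append, List.flatMap_def,
    List.map_map, Function.comp_def, List.append_assoc, List.flatten_append, List.flatten_flatten]
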